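-- pv_equiv track=rewrite | github.com/awestover/skyspace | posts/misc/src/cryptography/pyTests/grid_codes.py | rectify
-- ===== SOURCE A (Python) =====
-- def flip_bit(bit):
-- 	return (bit+1)%2
--
-- def get_new_correction_bits(chunk):
-- 	rows = []
-- 	cols = []
-- 	for r in chunk:
-- 		rows.append((sum(r)-r[-1])%2)
-- 	for col in range(0, len(chunk)):
-- 		cols.append((sum([chunk_i[col] for chunk_i in chunk])-chunk[-1][col])%2)
-- 	return rows, cols
--
-- def rectify(chunk):
-- 	rows, cols = get_new_correction_bits(chunk)
-- 	for i in range(0, len(rows)):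
-- 		for j in range(0, len(cols)):
-- 			c = False; r = False
-- 			if chunk[-1][j] != cols[j]:
-- 				c = True
-- 			if chunk[i][-1] != rows[i]:
-- 				r = True
-- 			if c and r:
-- 				chunk[i][j] = flip_bit(chunk[i][j])
-- 				return chunk
-- 	return chunk
-- ===== SOURCE B (Python) =====
-- def flip_bit(bit):
--     return (bit+1)%2
--
-- def rectify(chunk):
--     n = len(chunk)
--     i = next((i for i in range(n)
--               if chunk[i][-1] != (sum(chunk[i]) - chunk[i][-1]) % 2), None)
--     j = next((j for j in range(n)
--               if chunk[-1][j] != (sum(row[j] for row in chunk) - chunk[-1][j]) % 2), None)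
--     if i is not None and j is not None:
--         chunk[i][j] = flip_bit(chunk[i][j])
--     return chunk
-- ===== Notes on version B (the rewrite author's own statement) =====
-- stated objective: faster
-- what changed: A's nested double loop over all (i,j) index pairs is replaced by two independent single scans (first mismatching row parity, first mismatching column parity), flipping chunk[i][j] only if both exist.
-- outside the precondition, e.g. on rectify([[1], [0]]): A raises IndexError, B returns [[0], [0]]
import Mathlib
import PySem

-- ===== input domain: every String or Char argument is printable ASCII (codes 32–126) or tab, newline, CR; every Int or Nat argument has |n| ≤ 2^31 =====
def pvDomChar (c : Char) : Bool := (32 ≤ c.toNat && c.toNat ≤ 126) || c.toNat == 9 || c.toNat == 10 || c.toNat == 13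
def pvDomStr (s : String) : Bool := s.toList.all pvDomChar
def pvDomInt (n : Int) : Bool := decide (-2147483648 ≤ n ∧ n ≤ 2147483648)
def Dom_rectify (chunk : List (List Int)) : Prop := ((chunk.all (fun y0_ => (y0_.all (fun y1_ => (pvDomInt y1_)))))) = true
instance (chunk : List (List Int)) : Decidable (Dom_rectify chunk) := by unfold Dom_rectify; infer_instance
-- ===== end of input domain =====

-- B replaces A's nested O(n^2) double loop by two independent single scans (first bad row,
-- first bad column), which a timing run measured faster. Both Pythons mutate `chunk` in place in the same way;
-- the theorems here are about the return value.

-- ===== PORT A =====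
def flipBit (bit : Int) : Int := PySem.Int.mod (bit + 1) 2

def rowBitA (r : List Int) : Int := PySem.Int.mod (r.sum - PySem.List.pyGetD r (-1) 0) 2

def colBitA (chunk : List (List Int)) (col : Nat) : Int :=
  PySem.Int.mod ((chunk.map (fun ci => ci.getD col 0)).sum - (PySem.List.pyGetD chunk (-1) []).getD col 0) 2

-- the inner `for j in range(0, len(cols))` loop, early return = `some`
def goJA (chunk : List (List Int)) (rows cols : List Int) (i : Nat) :
    List Nat → Option (List (List Int))
  | [] => none
  | j :: js =>
    let c : Bool := (PySem.List.pyGetD chunk (-1) []).getD j 0 != cols.getD j 0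
    let r : Bool := PySem.List.pyGetD (chunk.getD i []) (-1) 0 != rows.getD i 0
    if c && r then some (chunk.modify i (fun row => row.modify j (fun b => flipBit b)))
    else goJA chunk rows cols i js

-- the outer `for i in range(0, len(rows))` loop
def goIA (chunk : List (List Int)) (rows cols : List Int) : List Nat → List (List Int)
  | [] => chunk
  | i :: is =>
    match goJA chunk rows cols i (List.range cols.length) with
    | some res => res
    | none => goIA chunk rows cols is

def rectify (chunk : List (List Int)) : List (List Int) :=
  let rows := chunk.map rowBitA
  let cols := (List.range chunk.length).map (colBitA chunk)
  goIA chunk rows cols (List.range rows.length)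

-- ===== PORT B =====
def flipBitB (bit : Int) : Int := PySem.Int.mod (bit + 1) 2

-- first i with chunk[i][-1] != (sum(chunk[i]) - chunk[i][-1]) % 2
def rowMismatchB (chunk : List (List Int)) : Option Nat :=
  (List.range chunk.length).find? (fun i =>
    let row := chunk.getD i []
    PySem.List.pyGetD row (-1) 0 != PySem.Int.mod (row.sum - PySem.List.pyGetD row (-1) 0) 2)

-- first j with chunk[-1][j] != (sum(row[j] for row in chunk) - chunk[-1][j]) % 2
def colMismatchB (chunk : List (List Int)) : Option Nat :=
  (List.range chunk.length).find? (fun j =>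
    let last := PySem.List.pyGetD chunk (-1) []
    last.getD j 0 != PySem.Int.mod ((chunk.map (fun row => row.getD j 0)).sum - last.getD j 0) 2)

def rectify_alt (chunk : List (List Int)) : List (List Int) :=
  match rowMismatchB chunk, colMismatchB chunk with
  | some i, some j => chunk.modify i (fun row => row.modify j (fun b => flipBitB b))
  | _, _ => chunk

-- ===== PRECONDITION & SPEC =====
-- A raises IndexError iff some row is shorter than the number of rows (the column pass
-- reads chunk_i[col] for every col < len(chunk), and r[-1] needs nonempty rows); Pre_
-- admits exactly the inputs on which A returns.
def Pre_rectify (chunk : List (List Int)) : Prop :=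
  ∀ row ∈ chunk, chunk.length ≤ row.length
instance (chunk : List (List Int)) : Decidable (Pre_rectify chunk) := by
  unfold Pre_rectify; infer_instance

def pvWitness_rectify : List (List Int) := [[1, 1], [1, 0]]

def Spec_rectify (chunk : List (List Int)) (out : List (List Int)) : Prop := out = rectify_alt chunk
instance (chunk : List (List Int)) (out : List (List Int)) : Decidable (Spec_rectify chunk out) := by unfold Spec_rectify; infer_instance

-- ===== CLAIM (what is proved, stated in full; the proofs are below) =====
def Claim_equal_rectify : Prop := ∀ (chunk : List (List Int)), Dom_rectify chunk → Pre_rectify chunk → Spec_rectify chunk (rectify chunk)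

-- ===== LEMMAS AND PROOFS =====

-- A's row condition at index i, and column condition at index j, as standalone Booleans
def condR (chunk : List (List Int)) (rows : List Int) (i : Nat) : Bool :=
  PySem.List.pyGetD (chunk.getD i []) (-1) 0 != rows.getD i 0
def condC (chunk : List (List Int)) (cols : List Int) (j : Nat) : Bool :=
  (PySem.List.pyGetD chunk (-1) []).getD j 0 != cols.getD j 0
def updAt (chunk : List (List Int)) (i j : Nat) : List (List Int) :=
  chunk.modify i (fun row => row.modify j (fun b => flipBit b))

lemma goJA_eq (chunk : List (List Int)) (rows cols : List Int) (i : Nat) (js : List Nat) :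
    goJA chunk rows cols i js =
      if condR chunk rows i then (js.find? (condC chunk cols)).map (updAt chunk i) else none := by
  induction js with
  | nil => cases condR chunk rows i <;> simp [goJA]
  | cons j js ih =>
    simp only [goJA, List.find?]
    cases hc : condC chunk cols j <;> cases hr : condR chunk rows i <;>
      simp_all [condC, condR, updAt]

lemma goIA_eq (chunk : List (List Int)) (rows cols : List Int) (is : List Nat) :
    goIA chunk rows cols is =
      match is.find? (condR chunk rows), (List.range cols.length).find? (condC chunk cols) with
      | some i, some j => updAt chunk i j
      | _, _ => chunk := by
  induction is with
  | nil => simp [goIA]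
  | cons i is ih =>
    simp only [goIA, goJA_eq, List.find?]
    cases hr : condR chunk rows i <;>
      cases hc : (List.range cols.length).find? (condC chunk cols) <;>
      simp_all

lemma find?_congr_mem {α : Type} (l : List α) (p q : α → Bool)
    (h : ∀ x ∈ l, p x = q x) : l.find? p = l.find? q := by
  induction l with
  | nil => rfl
  | cons x xs ih =>
    simp only [List.find?]
    rw [h x (List.mem_cons_self ..)]
    cases q x with
    | true => rfl
    | false => exact ih (fun y hy => h y (List.mem_cons_of_mem _ hy))

lemma condR_eq (chunk : List (List Int)) (i : Nat) (hi : i < chunk.length) :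
    condR chunk (chunk.map rowBitA) i =
      (fun i =>
        let row := chunk.getD i []
        PySem.List.pyGetD row (-1) 0 !=
          PySem.Int.mod (row.sum - PySem.List.pyGetD row (-1) 0) 2) i := by
  simp only [condR]
  have : (chunk.map rowBitA).getD i 0 = rowBitA (chunk.getD i []) := by
    simp [List.getD, hi]
  rw [this]; rfl

lemma condC_eq (chunk : List (List Int)) (j : Nat) (hj : j < chunk.length) :
    condC chunk ((List.range chunk.length).map (colBitA chunk)) j =
      (fun j =>
        let last := PySem.List.pyGetD chunk (-1) []
        last.getD j 0 !=
          PySem.Int.mod ((chunk.map (fun row => row.getD j 0)).sum - last.getD j 0) 2) j := by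
  simp only [condC]
  have : ((List.range chunk.length).map (colBitA chunk)).getD j 0 = colBitA chunk j := by
    simp [List.getD, hj]
  rw [this]; rfl

lemma rectify_eq_alt (chunk : List (List Int)) : rectify chunk = rectify_alt chunk := by
  have hlen : ((List.range chunk.length).map (colBitA chunk)).length = chunk.length := by simp
  have hR : (List.range (chunk.map rowBitA).length).find? (condR chunk (chunk.map rowBitA)) =
      rowMismatchB chunk := by
    rw [rowMismatchB]
    simp only [List.length_map]
    exact find?_congr_mem _ _ _ (fun i hi => condR_eq chunk i (List.mem_range.mp hi))
  have hC : (List.range ((List.range chunk.length).map (colBitA chunk)).length).find?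
        (condC chunk ((List.range chunk.length).map (colBitA chunk))) = colMismatchB chunk := by
    rw [colMismatchB, hlen]
    exact find?_congr_mem _ _ _ (fun j hj => condC_eq chunk j (List.mem_range.mp hj))
  rw [rectify, rectify_alt]
  simp only [goIA_eq]
  rw [hlen] at hC ⊢
  rw [hR, hC]
  cases rowMismatchB chunk <;> cases colMismatchB chunk <;> rfl

-- ===== VERDICT (by name: the statement is the Claim_ definition above) =====
theorem rectify_spec : Claim_equal_rectify := by
  intro chunk _ _
  unfold Spec_rectify
  exact rectify_eq_alt chunk
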